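-- pv_equiv track=rewrite | github.com/tudny/MIMUW-collection | WBO/WBO-collection/Lab12/lab.py | construct_c_array
-- ===== SOURCE A (Python) =====
-- def construct_c_array(bwt: str) -> dict[str, int]:
--     """
--     Construct C array for input string.
--     C array is a dictionary where keys are characters from input string and values are number of occurrences of
--     characters that are lexically smaller than key.
--     :param bwt: input string
--     :return: C array for bwt
--     """
--     count_map = {}
--     for letter in bwt:
--         count_map[letter] = count_map.get(letter, 0) + 1
--
--     alphabet = sorted(set(bwt))
--     c_array = {alphabet[0]: 0}
--     for i in range(1, len(alphabet)):
--         c_array[alphabet[i]] = c_array[alphabet[i - 1]] + count_map[alphabet[i - 1]]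
--
--     return c_array
-- ===== SOURCE B (Python) =====
-- def construct_c_array(bwt: str) -> dict[str, int]:
--     s = sorted(bwt)
--     c_array = {s[0]: 0}
--     prev = s[0]
--     for i, ch in enumerate(s[1:], start=1):
--         if ch != prev:
--             c_array[ch] = i
--             prev = ch
--     return c_array
-- ===== Notes on version B (the rewrite author's own statement) =====
-- stated objective: alternative
-- what changed: Replaces the occurrence-count map plus cumulative-sum loop over the sorted alphabet by one linear scan of the fully sorted string that records each group boundary's index as the C value, carrying the previous character in an accumulator.
import Mathlib
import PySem

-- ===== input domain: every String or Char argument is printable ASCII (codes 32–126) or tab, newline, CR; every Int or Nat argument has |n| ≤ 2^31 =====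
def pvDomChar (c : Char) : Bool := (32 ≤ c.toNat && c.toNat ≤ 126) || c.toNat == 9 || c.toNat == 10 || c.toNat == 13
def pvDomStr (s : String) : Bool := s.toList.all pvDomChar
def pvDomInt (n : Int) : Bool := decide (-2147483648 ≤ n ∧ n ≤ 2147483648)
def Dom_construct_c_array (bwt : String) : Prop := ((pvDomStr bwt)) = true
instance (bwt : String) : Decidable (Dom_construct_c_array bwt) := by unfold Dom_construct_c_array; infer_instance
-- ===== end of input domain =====

-- B replaces A's count-map plus cumulative-sum loop by one scan of the fully sorted
-- string recording group-boundary indices (a different decomposition, similar cost).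

-- ===== PORT A =====
-- 'for letter in bwt' iterates single-character strings: we pass the string as that list.
def pvACore (letters : List String) : List (String × Int) :=
  let count_map := letters.foldl
    (fun d x => d.insert x (d.getD x 0 + 1)) (PySem.Dict.empty : PySem.Dict String Int)
  let alphabet := PySem.List.sorted (PySem.Set.ofList letters) (fun x => x)
  let c0 := (PySem.Dict.empty : PySem.Dict String Int).insert (PySem.List.pyGetD alphabet 0 "") 0
  let c := (PySem.List.pyRange 1 (alphabet.length : Int)).foldl
    (fun d i =>
      d.insert (PySem.List.pyGetD alphabet i "")
        (d.getD (PySem.List.pyGetD alphabet (i - 1) "") 0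
          + count_map.getD (PySem.List.pyGetD alphabet (i - 1) "") 0)) c0
  c.items

def construct_c_array (bwt : String) : List (String × Int) :=
  pvACore (bwt.toList.map (fun c => String.singleton c))

-- ===== PORT B =====
-- the 'for i, ch in enumerate(s[1:], start=1)' loop as structural recursion on the tail,
-- carrying the dict, the previous character and the index.
def pvBGo (d : PySem.Dict String Int) (prev : String) (i : Int) :
    List String → PySem.Dict String Int
  | [] => d
  | ch :: rest =>
    if ch ≠ prev then pvBGo (d.insert ch i) ch (i + 1) rest
    else pvBGo d prev (i + 1) rest

def pvBCore (letters : List String) : List (String × Int) :=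
  match PySem.List.sorted letters (fun x => x) with
  | [] => []   -- Python raises IndexError at s[0] here; excluded by Pre_
  | h :: t =>
    (pvBGo ((PySem.Dict.empty : PySem.Dict String Int).insert h 0) h 1 t).items

def construct_c_array_alt (bwt : String) : List (String × Int) :=
  pvBCore (bwt.toList.map (fun c => String.singleton c))

-- ===== PRECONDITION & SPEC =====
-- A raises IndexError on the empty string (alphabet[0]); B raises there too (s[0]). Pre_ excludes it.
def Pre_construct_c_array (bwt : String) : Prop := bwt ≠ ""
instance (bwt : String) : Decidable (Pre_construct_c_array bwt) := by unfold Pre_construct_c_array; infer_instance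
def pvWitness_construct_c_array : String := "banana"
def Spec_construct_c_array (bwt : String) (out : List (String × Int)) : Prop := out = construct_c_array_alt bwt
instance (bwt : String) (out : List (String × Int)) : Decidable (Spec_construct_c_array bwt out) := by unfold Spec_construct_c_array; infer_instance

-- ===== CLAIM (what is proved, stated in full; the proofs are below) =====
def Claim_equal_construct_c_array : Prop := ∀ (bwt : String), Dom_construct_c_array bwt → Pre_construct_c_array bwt → Spec_construct_c_array bwt (construct_c_array bwt)

-- ===== LEMMAS AND PROOFS =====

-- the common value: number of letters strictly smaller than k
def pvCVal (l : List String) (k : String) : Int := (l.countP (fun x => decide (x < k)) : Int)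

-- the sorted distinct letters
def pvU (l : List String) : List String := PySem.List.sorted (PySem.Set.ofList l) (fun x => x)

theorem pvU_pairwise (l : List String) : (pvU l).Pairwise (· < ·) :=
  PySem.List.sorted_ofList_pairwise_lt l

theorem pvU_nodup (l : List String) : (pvU l).Nodup :=
  (pvU_pairwise l).imp (fun h => ne_of_lt h)

theorem pvU_mem (l : List String) (x : String) : x ∈ pvU l ↔ x ∈ l := by
  unfold pvU
  rw [PySem.List.mem_sorted, PySem.Set.mem_ofList]

theorem pvU_ne_nil (l : List String) (hl : l ≠ []) : pvU l ≠ [] := by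
  obtain ⟨x, hx⟩ := List.exists_mem_of_ne_nil l hl
  exact List.ne_nil_of_mem ((pvU_mem l x).mpr hx)

-- countP (≤ a) = countP (< a) + count a
theorem pv_countP_le (l : List String) (a : String) :
    l.countP (fun x => decide (x ≤ a)) = l.countP (fun x => decide (x < a)) + l.count a := by
  induction l with
  | nil => simp
  | cons y t ih =>
    simp only [List.countP_cons, List.count_cons, ih]
    rcases lt_trichotomy y a with h | h | h
    · rw [decide_eq_true (le_of_lt h), decide_eq_true h,
        beq_eq_false_iff_ne.mpr (ne_of_lt h)]
      simp
      omega
    · subst h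
      rw [decide_eq_true le_rfl, decide_eq_false (lt_irrefl y), beq_self_eq_true]
      simp
      omega
    · rw [decide_eq_false (not_le.mpr h), decide_eq_false (not_lt.mpr (le_of_lt h)),
        beq_eq_false_iff_ne.mpr (ne_of_gt h)]
      simp

theorem pvCVal_head (l : List String) (h : 0 < (pvU l).length) :
    pvCVal l ((pvU l)[0]) = 0 := by
  unfold pvCVal
  have hz : l.countP (fun x => decide (x < (pvU l)[0])) = 0 := by
    rw [List.countP_eq_zero]
    intro x hx
    obtain ⟨m, t, he⟩ := List.exists_cons_of_ne_nil (List.ne_nil_of_length_pos h)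
    have hm := PySem.List.key_head_sorted_le (PySem.Set.ofList l) (fun x => x) he
    have h0 : (pvU l)[0] = m := by simp [he]
    rw [h0]
    simpa using not_lt.mpr (hm x ((PySem.Set.mem_ofList l x).mpr hx))
  rw [hz]
  rfl

theorem pvCVal_succ (l : List String) (n : Nat) (h1 : 1 ≤ n) (h : n < (pvU l).length) :
    pvCVal l ((pvU l)[n]) = pvCVal l ((pvU l)[n-1]) + (l.count ((pvU l)[n-1]) : Int) := by
  have hprev : n - 1 < (pvU l).length := by omega
  have hab : (pvU l)[n-1] < (pvU l)[n] :=
    (List.pairwise_iff_getElem.mp (pvU_pairwise l)) (n-1) n hprev h (by omega)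
  have hcongr : l.countP (fun x => decide (x < (pvU l)[n]))
      = l.countP (fun x => decide (x ≤ (pvU l)[n-1])) := by
    apply List.countP_congr
    intro x hx
    have hxu : x ∈ pvU l := (pvU_mem l x).mpr hx
    obtain ⟨j, hj, hjx⟩ := List.mem_iff_getElem.mp hxu
    simp only [decide_eq_true_eq]
    constructor
    · intro hlt
      by_cases hjn : n ≤ j
      · exact absurd (lt_of_le_of_lt (PySem.List.sorted_id_getElem_mono _ hjn hj) (hjx ▸ hlt)) (lt_irrefl _)
      · calc x = (pvU l)[j] := hjx.symm
          _ ≤ (pvU l)[n-1] := PySem.List.sorted_id_getElem_mono _ (by omega) hprev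
    · intro hle
      exact lt_of_le_of_lt hle hab
  unfold pvCVal
  rw [hcongr, pv_countP_le]
  push_cast
  ring

-- keys of a dict whose items are (take n) of pvU, and freshness of the next key
theorem pvTake_nodup (l : List String) (n : Nat) : ((pvU l).take n).Nodup :=
  (pvU_nodup l).sublist (List.take_sublist n (pvU l))

theorem pvNotMemTake (l : List String) (n : Nat) (hn : n < (pvU l).length) :
    (pvU l)[n] ∉ (pvU l).take n := by
  intro hmem
  obtain ⟨j, hj, hjx⟩ := List.mem_iff_getElem.mp hmem
  have hjn : j < n := by
    have := hj
    simp only [List.length_take, lt_min_iff] at this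
    exact this.1
  have := (List.pairwise_iff_getElem.mp (pvU_pairwise l)) j n (by omega) hn hjn
  rw [List.getElem_take] at hjx
  exact absurd (hjx ▸ this) (lt_irrefl _)

def pvAInit (l : List String) : PySem.Dict String Int :=
  (PySem.Dict.empty : PySem.Dict String Int).insert (PySem.List.pyGetD (pvU l) 0 "") 0

def pvAStep (l : List String) (d : PySem.Dict String Int) (i : Int) : PySem.Dict String Int :=
  d.insert (PySem.List.pyGetD (pvU l) i "")
    (d.getD (PySem.List.pyGetD (pvU l) (i - 1) "") 0
      + (l.count (PySem.List.pyGetD (pvU l) (i - 1) "") : Int))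

theorem pvALoop (l : List String) (n : Nat) (h1 : 1 ≤ n) (hn : n ≤ (pvU l).length) :
    ((PySem.List.pyRange 1 (n : Int)).foldl (pvAStep l) (pvAInit l)).items
    = ((pvU l).take n).map (fun k => (k, pvCVal l k)) := by
  induction n, h1 using Nat.le_induction with
  | base =>
    have h0 : 0 < (pvU l).length := by omega
    have hr : PySem.List.pyRange 1 ((1:Nat) : Int) = [] := by decide
    rw [hr]
    simp only [List.foldl_nil]
    unfold pvAInit
    rw [PySem.Dict.items_insert_of_not_contains _ _ (PySem.Dict.contains_empty _)]
    have hg : PySem.List.pyGetD (pvU l) 0 "" = (pvU l)[0] := by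
      rw [PySem.List.pyGetD_zero, List.getD_eq_getElem _ _ h0]
    have ht : (pvU l).take 1 = [(pvU l)[0]] := by
      rw [List.take_succ, List.take_zero, List.getElem?_eq_getElem h0]
      rfl
    rw [hg, ht, List.map_cons, pvCVal_head l h0]
    rfl
  | succ n h1 ih =>
    have hn' : n < (pvU l).length := by omega
    have ih' := ih (by omega)
    have hcast : (((n+1:Nat)) : Int) = (n : Int) + 1 := by push_cast; ring
    rw [hcast, PySem.List.pyRange_one_succ_right (by exact_mod_cast h1 : (1:Int) ≤ (n:Int)),
      List.foldl_append]
    simp only [List.foldl_cons, List.foldl_nil]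
    have hgn : PySem.List.pyGetD (pvU l) (n : Int) "" = (pvU l)[n] := by
      rw [PySem.List.pyGetD_natCast, List.getD_eq_getElem _ _ hn']
    have hm1 : ((n : Int) - 1) = ((n - 1 : Nat) : Int) := by omega
    have hgp : PySem.List.pyGetD (pvU l) ((n : Int) - 1) "" = (pvU l)[n-1] := by
      rw [hm1, PySem.List.pyGetD_natCast, List.getD_eq_getElem _ _ (by omega)]
    have hkeys : ((PySem.List.pyRange 1 (n : Int)).foldl (pvAStep l) (pvAInit l)).keys
        = (pvU l).take n := by
      simp only [PySem.Dict.keys, ih', List.map_map]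
      rw [show ((fun (x : String × Int) => x.1) ∘ fun k => (k, pvCVal l k)) = id from rfl,
        List.map_id]
    have hfresh : ((PySem.List.pyRange 1 (n : Int)).foldl (pvAStep l) (pvAInit l)).contains
        ((pvU l)[n]) = false := by
      rw [PySem.Dict.contains_eq_decide_mem_keys, hkeys]
      simpa using pvNotMemTake l n hn'
    have hmemit : ((pvU l)[n-1], pvCVal l ((pvU l)[n-1]))
        ∈ ((PySem.List.pyRange 1 (n : Int)).foldl (pvAStep l) (pvAInit l)).items := by
      rw [ih']
      apply List.mem_map_of_mem
      have : ((pvU l).take n)[n-1]'(by simpa using (by omega : n - 1 < n ∧ n - 1 < (pvU l).length)) = (pvU l)[n-1] := List.getElem_take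
      exact this ▸ List.getElem_mem _
    have hgetD : ((PySem.List.pyRange 1 (n : Int)).foldl (pvAStep l) (pvAInit l)).getD
        ((pvU l)[n-1]) 0 = pvCVal l ((pvU l)[n-1]) :=
      PySem.Dict.getD_of_mem_items _ hmemit (hkeys ▸ pvTake_nodup l n) 0
    conv_lhs => rw [pvAStep, hgn, hgp]
    rw [PySem.Dict.items_insert_of_not_contains _ _ hfresh, hgetD, ih']
    have ht : (pvU l).take (n+1) = (pvU l).take n ++ [(pvU l)[n]] := by
      rw [List.take_succ, List.getElem?_eq_getElem hn']
      rfl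
    rw [ht, List.map_append, List.map_singleton, pvCVal_succ l n h1 hn']

theorem pvACore_eq (l : List String) (hl : l ≠ []) :
    pvACore l = (pvU l).map (fun k => (k, pvCVal l k)) := by
  have h0 : 0 < (pvU l).length := List.length_pos_of_ne_nil (pvU_ne_nil l hl)
  have hcm : ∀ k : String,
      (l.foldl (fun d x => d.insert x (d.getD x 0 + 1))
        (PySem.Dict.empty : PySem.Dict String Int)).getD k 0 = (l.count k : Int) := by
    intro k
    rw [PySem.Dict.getD_foldl_insert_add_one]
    simp [PySem.Dict.getD_empty]
  have hmain := pvALoop l (pvU l).length h0 le_rfl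
  rw [List.take_length] at hmain
  simp only [pvACore, hcm]
  exact hmain

-- B side: the fully sorted list
abbrev pvS (l : List String) : List String := PySem.List.sorted l (fun x => x)

theorem pvOfList_sublist (xs : List String) : (PySem.Set.ofList xs).Sublist xs := by
  induction xs using List.reverseRecOn with
  | nil => simp
  | append_singleton xs x ih =>
    rw [PySem.Set.ofList_append, PySem.Set.update_cons, PySem.Set.update_nil, PySem.Set.add]
    split
    · exact ih.trans (List.sublist_append_left xs [x])
    · exact List.Sublist.append ih (List.Sublist.refl [x])

theorem pvU_eq_dedup (l : List String) : pvU l = PySem.Set.ofList (pvS l) := by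
  apply PySem.List.sorted_eq_of_perm_of_pairwise_lt
  · rw [List.perm_ext_iff_of_nodup (PySem.Set.nodup_ofList _) (PySem.Set.nodup_ofList _)]
    intro a
    simp only [PySem.Set.mem_ofList, pvS, PySem.List.mem_sorted]
  · have hle : (PySem.Set.ofList (pvS l)).Pairwise (· ≤ ·) :=
      List.Pairwise.sublist (pvOfList_sublist _) (PySem.List.sorted_pairwise l (fun x => x))
    have hne : (PySem.Set.ofList (pvS l)).Pairwise (· ≠ ·) :=
      PySem.Set.nodup_ofList _
    exact (hle.and hne).imp (fun h => lt_of_le_of_ne h.1 h.2)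

theorem pvCVal_eq_countP_S (l : List String) (k : String) :
    pvCVal l k = (List.countP (fun x => decide (x < k)) (pvS l) : Int) := by
  unfold pvCVal pvS
  exact_mod_cast ((PySem.List.sorted_perm l (fun x => x) false).countP_eq _).symm

theorem pvSVal_head (l : List String) (h : 0 < (pvS l).length) :
    pvCVal l ((pvS l)[0]) = 0 := by
  rw [pvCVal_eq_countP_S]
  have hz : List.countP (fun x => decide (x < (pvS l)[0])) (pvS l) = 0 := by
    rw [List.countP_eq_zero]
    intro x hx
    obtain ⟨m, t, he⟩ := List.exists_cons_of_ne_nil (List.ne_nil_of_length_pos h)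
    have hm := PySem.List.key_head_sorted_le l (fun x => x) he
    have h0 : (pvS l)[0] = m := by simp [he]
    rw [h0]
    have hxl : x ∈ l := (PySem.List.mem_sorted l (fun x => x) false x).mp hx
    simpa using not_lt.mpr (hm x hxl)
  rw [hz]
  rfl

theorem pvS_take_lt (l : List String) (n : Nat) (h1 : 1 ≤ n) (hn : n < (pvS l).length)
    (hne : (pvS l)[n] ≠ (pvS l)[n-1]) :
    ∀ x ∈ (pvS l).take n, x < (pvS l)[n] := by
  have hnS : n < (PySem.List.sorted l (fun x => x)).length := hn
  intro x hx
  obtain ⟨j, hj, hjx⟩ := List.mem_iff_getElem.mp hx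
  have hjn : j < n := by
    have := hj
    simp only [List.length_take, lt_min_iff] at this
    exact this.1
  rw [List.getElem_take] at hjx
  have hle : (pvS l)[j] ≤ (pvS l)[n-1] :=
    PySem.List.sorted_id_getElem_mono l (by omega) (by omega)
  have hlt : (pvS l)[n-1] < (pvS l)[n] :=
    lt_of_le_of_ne (PySem.List.sorted_id_getElem_mono l (by omega) hn) (Ne.symm hne)
  exact hjx ▸ lt_of_le_of_lt hle hlt

theorem pvSVal_boundary (l : List String) (n : Nat) (h1 : 1 ≤ n) (hn : n < (pvS l).length)
    (hne : (pvS l)[n] ≠ (pvS l)[n-1]) :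
    pvCVal l ((pvS l)[n]) = (n : Int) := by
  have hnS : n < (PySem.List.sorted l (fun x => x)).length := hn
  rw [pvCVal_eq_countP_S]
  obtain ⟨b, hb⟩ : ∃ b, (pvS l)[n] = b := ⟨_, rfl⟩
  rw [hb]
  have hsplit : pvS l = (pvS l).take n ++ (pvS l).drop n := (List.take_append_drop n (pvS l)).symm
  conv_lhs => rw [hsplit]
  rw [List.countP_append]
  have hc1 : List.countP (fun x => decide (x < b)) ((pvS l).take n) = n := by
    have hlen : ((pvS l).take n).length = n := by
      rw [List.length_take]
      omega
    calc List.countP (fun x => decide (x < b)) ((pvS l).take n)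
        = ((pvS l).take n).length :=
          List.countP_eq_length.mpr
            (fun x hx => decide_eq_true (hb ▸ pvS_take_lt l n h1 hn hne x hx))
      _ = n := hlen
  have hc2 : List.countP (fun x => decide (x < b)) ((pvS l).drop n) = 0 := by
    rw [List.countP_eq_zero]
    intro x hx
    obtain ⟨j, hj, hjx⟩ := List.mem_iff_getElem.mp hx
    have hjlen : n + j < (pvS l).length := by
      have hd : ((pvS l).drop n).length = (pvS l).length - n := List.length_drop
      omega
    rw [List.getElem_drop] at hjx
    have hmono : (pvS l)[n] ≤ (pvS l)[n+j]'hjlen :=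
      PySem.List.sorted_id_getElem_mono l (by omega) hjlen
    exact fun hcon => absurd (of_decide_eq_true hcon) (not_lt.mpr (hjx ▸ hb ▸ hmono))
  rw [hc1, hc2]
  simp

-- invariant for B's recursive scan: after processing the first n letters (prev = s[n-1]),
-- the dict's items are the map over the distinct letters of (take n)
theorem pvBGo_inv (l : List String) (k : Nat) :
    ∀ (n : Nat) (_ : (pvS l).length - n = k) (h1 : 1 ≤ n) (_ : n ≤ (pvS l).length)
    (d : PySem.Dict String Int),
    d.items = (PySem.Set.ofList ((pvS l).take n)).map (fun a => (a, pvCVal l a)) →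
    (pvBGo d ((pvS l)[n-1]'(by omega)) (n : Int) ((pvS l).drop n)).items
      = (PySem.Set.ofList (pvS l)).map (fun a => (a, pvCVal l a)) := by
  induction k with
  | zero =>
    intro n hk h1 hn d hd
    have hnl : n = (pvS l).length := by omega
    subst hnl
    rw [List.drop_length, List.take_length] at *
    simpa [pvBGo] using hd
  | succ k ih =>
    intro n hk h1 hn d hd
    have hn' : n < (pvS l).length := by omega
    have hdrop : (pvS l).drop n = (pvS l)[n] :: (pvS l).drop (n+1) :=
      List.drop_eq_getElem_cons hn'
    rw [hdrop]
    have hofl : PySem.Set.ofList ((pvS l).take (n+1))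
        = (PySem.Set.ofList ((pvS l).take n)).add ((pvS l)[n]) := by
      rw [List.take_succ, List.getElem?_eq_getElem hn']
      show PySem.Set.ofList ((pvS l).take n ++ [(pvS l)[n]]) = _
      rw [PySem.Set.ofList_append, PySem.Set.update_cons, PySem.Set.update_nil]
    have hcast : ((n : Int) + 1) = ((n+1 : Nat) : Int) := by push_cast; ring
    have hidx : (pvS l)[(n+1)-1]'(by omega) = (pvS l)[n] := by simp
    by_cases heq : (pvS l)[n] = (pvS l)[n-1]
    · rw [pvBGo, if_neg (by simpa using heq)]
      have hmem : (pvS l)[n] ∈ PySem.Set.ofList ((pvS l).take n) := by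
        rw [PySem.Set.mem_ofList]
        have hg : ((pvS l).take n)[n-1]'(by rw [List.length_take]; omega) = (pvS l)[n-1] :=
          List.getElem_take
        exact heq ▸ hg ▸ List.getElem_mem _
      have hd' : d.items = (PySem.Set.ofList ((pvS l).take (n+1))).map (fun a => (a, pvCVal l a)) := by
        rw [hofl, PySem.Set.add, if_pos ((PySem.Set.contains_iff _ _).mpr hmem)]
        exact hd
      have := ih (n+1) (by omega) (by omega) (by omega) d hd'
      rw [hidx] at this
      rw [hcast]
      exact heq ▸ this
    · rw [pvBGo, if_pos (by simpa using heq)]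
      have hnotmem : (pvS l)[n] ∉ PySem.Set.ofList ((pvS l).take n) := by
        rw [PySem.Set.mem_ofList]
        intro hmem
        exact absurd rfl (ne_of_lt (pvS_take_lt l n h1 hn' heq _ hmem))
      have hkeys : d.keys = PySem.Set.ofList ((pvS l).take n) := by
        simp only [PySem.Dict.keys, hd, List.map_map]
        rw [show ((fun (x : String × Int) => x.1) ∘ fun a => (a, pvCVal l a)) = id from rfl,
          List.map_id]
      have hfresh : d.contains ((pvS l)[n]) = false := by
        rw [PySem.Dict.contains_eq_decide_mem_keys, hkeys]
        simpa using hnotmem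
      have hd' : (d.insert ((pvS l)[n]) (n : Int)).items
          = (PySem.Set.ofList ((pvS l).take (n+1))).map (fun a => (a, pvCVal l a)) := by
        rw [PySem.Dict.items_insert_of_not_contains _ _ hfresh, hd, hofl, PySem.Set.add]
        rw [if_neg (by simpa using (fun h => hnotmem ((PySem.Set.contains_iff _ _).mp h)))]
        rw [List.map_append, List.map_singleton, pvSVal_boundary l n h1 hn' heq]
      have := ih (n+1) (by omega) (by omega) (by omega) _ hd'
      rw [hidx] at this
      rw [hcast]
      exact this

theorem pvBCore_eq (l : List String) (hl : l ≠ []) :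
    pvBCore l = (pvU l).map (fun k => (k, pvCVal l k)) := by
  have hs : (pvS l).length = l.length := PySem.List.length_sorted l (fun x => x) false
  have h0 : 0 < (pvS l).length := by
    rw [hs]
    exact List.length_pos_of_ne_nil hl
  obtain ⟨h, t, he⟩ := List.exists_cons_of_ne_nil (List.ne_nil_of_length_pos h0)
  have hd0 : ((PySem.Dict.empty : PySem.Dict String Int).insert h 0).items
      = (PySem.Set.ofList ((pvS l).take 1)).map (fun a => (a, pvCVal l a)) := by
    rw [PySem.Dict.items_insert_of_not_contains _ _ (PySem.Dict.contains_empty _)]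
    have hg0 : (pvS l)[0] = h := by simp [he]
    have ht : (pvS l).take 1 = [(pvS l)[0]] := by
      rw [List.take_succ, List.take_zero, List.getElem?_eq_getElem h0]
      rfl
    rw [ht, hg0]
    show _ = List.map _ (PySem.Set.ofList [h])
    have : PySem.Set.ofList [h] = [h] := rfl
    rw [this, List.map_singleton, ← hg0, pvSVal_head l h0, hg0]
    rfl
  have hmain := pvBGo_inv l ((pvS l).length - 1) 1 rfl le_rfl (by omega)
    ((PySem.Dict.empty : PySem.Dict String Int).insert h 0) hd0
  have hg0 : (pvS l)[1-1]'(by omega) = h := by simp [he]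
  have hdrop1 : (pvS l).drop 1 = t := by rw [he]; rfl
  rw [hg0, hdrop1] at hmain
  unfold pvBCore
  show (match pvS l with
    | [] => []
    | h :: t => (pvBGo ((PySem.Dict.empty : PySem.Dict String Int).insert h 0) h 1 t).items)
    = _
  rw [he]
  simp only
  rw [show ((1:Nat):Int) = (1:Int) from rfl] at hmain
  rw [hmain, ← pvU_eq_dedup]

-- ===== VERDICT (by name: the statement is the Claim_ definition above) =====
theorem construct_c_array_spec : Claim_equal_construct_c_array := by
  intro bwt _ hpre
  unfold Spec_construct_c_array construct_c_array construct_c_array_alt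
  have hl : bwt.toList.map (fun c => String.singleton c) ≠ [] := by
    simp only [ne_eq, List.map_eq_nil_iff]
    intro h
    exact hpre (String.toList_eq_nil_iff.mp h)
  rw [pvACore_eq _ hl, pvBCore_eq _ hl]
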